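-- pv_equiv track=rewrite | github.com/wyk18703232953/myResearch | codeComplex/data copy/filteredData/python/quadratic/python_quadratic_0432.py | is_golden
-- ===== SOURCE A (Python) =====
-- def is_golden(total, integers):
--     current_total = 0
--     for i, val in enumerate(integers):
--         current_total += val
--         if current_total < total:
--             continue
--         elif current_total == total:
--             splice = integers[i+1:]
--             return (not splice) or is_golden(total, splice)
--         elif current_total > total:
--             return False
--     return False
-- ===== SOURCE B (Python) =====
-- def is_golden(total, integers):
--     current = 0
--     ok = False
--     for val in integers:
--         current += val
--         if current < total:
--             ok = False
--         elif current == total: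
--             current = 0
--             ok = True
--         else:
--             return False
--     return ok
-- ===== Notes on version B (the rewrite author's own statement) =====
-- stated objective: simpler
-- what changed: Replaced A's recursion that re-slices the list at every exactly-matching prefix with a single iterative pass keeping a running sum that resets to 0 on equality (plus a flag for whether the last element closed a segment).
import Mathlib
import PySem

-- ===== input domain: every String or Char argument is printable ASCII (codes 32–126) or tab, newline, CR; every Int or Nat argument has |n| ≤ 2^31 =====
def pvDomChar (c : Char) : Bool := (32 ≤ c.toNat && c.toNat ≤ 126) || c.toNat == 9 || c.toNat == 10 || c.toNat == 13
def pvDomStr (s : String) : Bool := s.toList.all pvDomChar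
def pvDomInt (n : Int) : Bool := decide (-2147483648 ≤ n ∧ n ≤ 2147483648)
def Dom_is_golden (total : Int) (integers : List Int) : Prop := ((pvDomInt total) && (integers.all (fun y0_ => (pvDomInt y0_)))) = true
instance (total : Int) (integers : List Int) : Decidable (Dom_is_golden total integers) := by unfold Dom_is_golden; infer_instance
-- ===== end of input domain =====

-- B replaces A's recursion-with-slicing by a single iterative pass with a running
-- sum that resets on equality; objective: simpler (no recursion, no slicing).

-- ===== PORT A =====
-- A's for-loop over `enumerate(integers)`: walks the suffix carrying current_total;
-- on equality it returns the splice `integers[i+1:]` (= the remaining suffix) for the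
-- outer recursion; falling off the loop or overshooting yields none (→ False).
def isGoldenLoopA (total ct : Int) : List Int → Option (List Int)
  | [] => none
  | v :: rest =>
    let ct := ct + v
    if ct < total then isGoldenLoopA total ct rest
    else if ct = total then some rest
    else none

theorem isGoldenLoopA_lt {total ct : Int} {l r : List Int}
    (h : isGoldenLoopA total ct l = some r) : r.length < l.length := by
  induction l generalizing ct with
  | nil => simp [isGoldenLoopA] at h
  | cons v rest ih =>
    simp only [isGoldenLoopA] at h
    split_ifs at h with h1 h2
    · exact Nat.lt_trans (ih h) (by simp)
    · cases h; simp

def is_golden (total : Int) (integers : List Int) : Bool :=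
  match h : isGoldenLoopA total 0 integers with
  | none => false
  | some splice => splice.isEmpty || is_golden total splice
termination_by integers.length
decreasing_by exact isGoldenLoopA_lt h

-- ===== PORT B =====
-- Source B's single loop: running sum `s`, flag `ok` true iff a segment ended exactly
-- at the last element seen; overshoot returns false immediately.
def isGoldenLoopB (total s : Int) (ok : Bool) : List Int → Bool
  | [] => ok
  | v :: rest =>
    let s := s + v
    if s < total then isGoldenLoopB total s false rest
    else if s = total then isGoldenLoopB total 0 true rest
    else false

def is_golden_alt (total : Int) (integers : List Int) : Bool :=
  isGoldenLoopB total 0 false integers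

-- ===== PRECONDITION & SPEC =====
def Spec_is_golden (total : Int) (integers : List Int) (out : Bool) : Prop := out = is_golden_alt total integers
instance (total : Int) (integers : List Int) (out : Bool) : Decidable (Spec_is_golden total integers out) := by unfold Spec_is_golden; infer_instance

-- ===== CLAIM (what is proved, stated in full; the proofs are below) =====
def Claim_equal_is_golden : Prop := ∀ (total : Int) (integers : List Int), Dom_is_golden total integers → Spec_is_golden total integers (is_golden total integers)

-- ===== LEMMAS AND PROOFS =====

-- On a nonempty list the loop's result does not depend on the incoming ok flag.
theorem loopB_ok_irrel (total s : Int) (ok ok' : Bool) (v : Int) (rest : List Int) :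
    isGoldenLoopB total s ok (v :: rest) = isGoldenLoopB total s ok' (v :: rest) := by
  simp only [isGoldenLoopB]

-- Restarting with ok = true equals "empty, or restart with ok = false".
theorem loopB_true (total : Int) (l : List Int) :
    isGoldenLoopB total 0 true l = (l.isEmpty || isGoldenLoopB total 0 false l) := by
  cases l with
  | nil => simp [isGoldenLoopB]
  | cons v rest => simp [List.isEmpty, loopB_ok_irrel total 0 true false v rest]

-- Inner-loop correspondence: B's loop from state (ct, false) tracks A's loop.
theorem loopAB (total : Int) (l : List Int) : ∀ ct : Int,
    (isGoldenLoopA total ct l = none → isGoldenLoopB total ct false l = false) ∧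
    (∀ r, isGoldenLoopA total ct l = some r →
      isGoldenLoopB total ct false l = isGoldenLoopB total 0 true r) := by
  induction l with
  | nil => intro ct; exact ⟨fun _ => rfl, fun r h => by simp [isGoldenLoopA] at h⟩
  | cons v rest ih =>
    intro ct
    constructor
    · intro h
      simp only [isGoldenLoopA] at h
      simp only [isGoldenLoopB]
      split_ifs at h ⊢ with h1 h2
      · exact (ih (ct + v)).1 h
      · rfl
    · intro r h
      simp only [isGoldenLoopA] at h
      simp only [isGoldenLoopB]
      split_ifs at h ⊢ with h1 h2
      · exact (ih (ct + v)).2 r h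
      · cases h; rfl

theorem is_golden_eq_alt (total : Int) (l : List Int) :
    is_golden total l = is_golden_alt total l := by
  generalize hn : l.length = n
  induction n using Nat.strong_induction_on generalizing l with
  | _ n ih =>
    subst hn
    unfold is_golden is_golden_alt
    cases h : isGoldenLoopA total 0 l with
    | none => exact ((loopAB total l 0).1 h).symm
    | some r =>
      rw [(loopAB total l 0).2 r h, loopB_true]
      have := ih r.length (isGoldenLoopA_lt h) r rfl
      unfold is_golden_alt at this
      rw [← this]

-- ===== VERDICT (by name: the statement is the Claim_ definition above) =====
theorem is_golden_spec : Claim_equal_is_golden := by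
  intro total integers _
  exact is_golden_eq_alt total integers
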